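-- pv_equiv track=rewrite | github.com/cherishing99/pyrocko | src/squirrel/client/fdsn.py | combine_selections
-- ===== SOURCE A (Python) =====
-- def combine_selections(selection):
--     out = []
--     last = None
--     for this in selection:
--         if last and this[:4] == last[:4] and this[4] == last[5]:
--             last = last[:5] + (this[5],)
--         else:
--             if last:
--                 out.append(last)
--
--             last = this
--
--     if last:
--         out.append(last)
--
--     return out
-- ===== SOURCE B (Python) =====
-- def combine_selections(selection):
--     # Build the merged list back-to-front: scan the selection in reverse,
--     # keeping the (reversed) result in `out`; out[-1] is the earliest
--     # interval produced so far, and a new tuple either extends it on the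
--     # left or starts a new interval. Reverse once at the end.
--     out = []
--     for this in reversed(selection):
--         if out and out[-1][:4] == this[:4] and out[-1][4] == this[5]:
--             out[-1] = this[:5] + (out[-1][5],)
--         else:
--             out.append(this)
--     out.reverse()
--     return out
-- ===== Notes on version B (the rewrite author's own statement) =====
-- stated objective: alternative
-- what changed: Replaces A's forward accumulator loop (out list plus pending 'last' interval) with a single backward pass that builds the merged list back-to-front, extending the most recent interval on the left or starting a new one; no pending-state variable or final flush.
import Mathlib
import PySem

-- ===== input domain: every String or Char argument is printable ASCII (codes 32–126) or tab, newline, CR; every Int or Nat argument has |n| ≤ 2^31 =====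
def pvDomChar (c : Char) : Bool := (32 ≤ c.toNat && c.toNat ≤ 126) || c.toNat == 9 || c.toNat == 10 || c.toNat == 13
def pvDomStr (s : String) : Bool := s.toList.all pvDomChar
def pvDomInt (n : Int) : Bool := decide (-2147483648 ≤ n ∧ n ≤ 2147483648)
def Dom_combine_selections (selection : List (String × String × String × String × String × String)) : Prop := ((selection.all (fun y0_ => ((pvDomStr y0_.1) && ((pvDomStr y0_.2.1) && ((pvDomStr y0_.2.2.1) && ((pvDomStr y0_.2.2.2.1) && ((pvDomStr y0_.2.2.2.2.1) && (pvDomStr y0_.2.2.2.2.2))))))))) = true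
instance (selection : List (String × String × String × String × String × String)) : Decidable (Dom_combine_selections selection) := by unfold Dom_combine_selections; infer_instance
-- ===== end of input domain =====

-- B builds the merged list back-to-front in one reverse pass instead of A's forward loop with a pending `last`; same cost, different decomposition (return-value equivalence proved below).

-- tuple[:4] of a 6-tuple
def pvKey4 (t : String × String × String × String × String × String) : String × String × String × String :=
  (t.1, t.2.1, t.2.2.1, t.2.2.2.1)

-- ===== PORT A =====
-- A's loop state: (out, last); `if last` is always true for a bound 6-tuple, so last is an Option.
def pvStepA (st : List (String × String × String × String × String × String) × Option (String × String × String × String × String × String))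
    (this : String × String × String × String × String × String) :
    List (String × String × String × String × String × String) × Option (String × String × String × String × String × String) :=
  match st.2 with
  | some last =>
      if (pvKey4 this == pvKey4 last) && (this.2.2.2.2.1 == last.2.2.2.2.2) then
        (st.1, some (last.1, last.2.1, last.2.2.1, last.2.2.2.1, last.2.2.2.2.1, this.2.2.2.2.2))
      else
        (st.1 ++ [last], some this)
  | none => (st.1, some this)

def combine_selections (selection : List (String × String × String × String × String × String)) : List (String × String × String × String × String × String) :=
  let st := selection.foldl pvStepA ([], none)
  match st.2 with
  | some last => st.1 ++ [last]
  | none => st.1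

-- ===== PORT B =====
-- Source B keeps `out` as a Python list whose LAST element is the interval most recently
-- produced; here `out` is a Lean list whose HEAD plays that role (Python's out reversed),
-- so Python's final `out.reverse()` is the identity on this representation.
def pvStepB (out : List (String × String × String × String × String × String))
    (this : String × String × String × String × String × String) :
    List (String × String × String × String × String × String) :=
  match out with
  | x :: xs =>
      if (pvKey4 x == pvKey4 this) && (x.2.2.2.2.1 == this.2.2.2.2.2) then
        (this.1, this.2.1, this.2.2.1, this.2.2.2.1, this.2.2.2.2.1, x.2.2.2.2.2) :: xs
      else
        this :: x :: xs
  | [] => [this]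

def combine_selections_alt (selection : List (String × String × String × String × String × String)) : List (String × String × String × String × String × String) :=
  selection.reverse.foldl pvStepB []

-- ===== PRECONDITION & SPEC =====
def Spec_combine_selections (selection : List (String × String × String × String × String × String)) (out : List (String × String × String × String × String × String)) : Prop := out = combine_selections_alt selection
instance (selection : List (String × String × String × String × String × String)) (out : List (String × String × String × String × String × String)) : Decidable (Spec_combine_selections selection out) := by unfold Spec_combine_selections; infer_instance

-- ===== CLAIM (what is proved, stated in full; the proofs are below) =====
def Claim_equal_combine_selections : Prop := ∀ (selection : List (String × String × String × String × String × String)), Dom_combine_selections selection → Spec_combine_selections selection (combine_selections selection)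

-- ===== LEMMAS AND PROOFS =====

-- A's remaining run, with pending interval `last`, written as structural recursion.
def pvRunA (last : String × String × String × String × String × String)
    (l : List (String × String × String × String × String × String)) :
    List (String × String × String × String × String × String) :=
  match l with
  | [] => [last]
  | this :: rest =>
      if (pvKey4 this == pvKey4 last) && (this.2.2.2.2.1 == last.2.2.2.2.2) then
        pvRunA (last.1, last.2.1, last.2.2.1, last.2.2.2.1, last.2.2.2.2.1, this.2.2.2.2.2) rest
      else
        last :: pvRunA this rest

theorem pvFoldA_eq (l : List (String × String × String × String × String × String))
    (out : List (String × String × String × String × String × String))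
    (last : String × String × String × String × String × String) :
    (match (l.foldl pvStepA (out, some last)).2 with
      | some t => (l.foldl pvStepA (out, some last)).1 ++ [t]
      | none => (l.foldl pvStepA (out, some last)).1) = out ++ pvRunA last l := by
  induction l generalizing out last with
  | nil => simp [pvRunA]
  | cons this rest ih =>
      simp only [List.foldl_cons, pvStepA, pvRunA]
      by_cases h : ((pvKey4 this == pvKey4 last) && (this.2.2.2.2.1 == last.2.2.2.2.2)) = true
      · simp [h, ih]
      · simp [h, ih]

theorem pvRunA_eq_foldr (l : List (String × String × String × String × String × String))
    (last : String × String × String × String × String × String) :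
    pvRunA last l = pvStepB (l.foldr (fun a b => pvStepB b a) []) last := by
  induction l generalizing last with
  | nil => simp [pvRunA, pvStepB]
  | cons this rest ih =>
      simp only [pvRunA, List.foldr_cons, ih]
      by_cases h : ((pvKey4 this == pvKey4 last) && (this.2.2.2.2.1 == last.2.2.2.2.2)) = true
      · rw [if_pos h]
        simp only [Bool.and_eq_true, beq_iff_eq, pvKey4, Prod.mk.injEq] at h
        obtain ⟨⟨h1, h2, h3, h4⟩, h5⟩ := h
        rcases hR : (rest.foldr (fun a b => pvStepB b a) []) with _ | ⟨x, xs⟩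
        · simp [pvStepB, pvKey4, h1, h2, h3, h4, h5]
        · simp only [pvStepB, pvKey4, h1, h2, h3, h4, h5]
          by_cases c : (x.1 = last.1 ∧ x.2.1 = last.2.1 ∧ x.2.2.1 = last.2.2.1 ∧ x.2.2.2.1 = last.2.2.2.1) ∧ x.2.2.2.2.1 = this.2.2.2.2.2
          · simp [c]
          · simp [c]
            exact ⟨h1, h2, h3, h4, h5⟩
      · rw [if_neg h]
        have hp : ¬((this.1 = last.1 ∧ this.2.1 = last.2.1 ∧ this.2.2.1 = last.2.2.1 ∧ this.2.2.2.1 = last.2.2.2.1) ∧ this.2.2.2.2.1 = last.2.2.2.2.2) := by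
          simpa [pvKey4, and_assoc] using h
        rcases hR : (rest.foldr (fun a b => pvStepB b a) []) with _ | ⟨x, xs⟩
        · simp [pvStepB, pvKey4, hp]
        · by_cases c : (x.1 = this.1 ∧ x.2.1 = this.2.1 ∧ x.2.2.1 = this.2.2.1 ∧ x.2.2.2.1 = this.2.2.2.1) ∧ x.2.2.2.2.1 = this.2.2.2.2.2
          · simp [pvStepB, pvKey4, c, hp]
          · simp [pvStepB, pvKey4, c, hp]

theorem combine_selections_eq (selection : List (String × String × String × String × String × String)) :
    combine_selections selection = combine_selections_alt selection := by
  cases selection with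
  | nil => rfl
  | cons h t =>
      have hB : combine_selections_alt (h :: t) =
          pvStepB (t.foldr (fun a b => pvStepB b a) []) h := by
        simp [combine_selections_alt, List.foldl_reverse]
      have hA : combine_selections (h :: t) = pvRunA h t := by
        have := pvFoldA_eq t [] h
        simpa [combine_selections, pvStepA] using this
      rw [hA, hB, pvRunA_eq_foldr]

-- ===== VERDICT (by name: the statement is the Claim_ definition above) =====
theorem combine_selections_spec : Claim_equal_combine_selections := by
  intro selection _
  unfold Spec_combine_selections
  exact combine_selections_eq selection
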